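-- pv_equiv track=rewrite | github.com/pawelzar/python-tic-tac-toe | tictactoe.py | check_all_columns
-- ===== SOURCE A (Python) =====
-- def check_all_columns(board):
--     """
--     Return 'X' if any column consists entirely of 'X', 'O' accordingly.
--     If there is no such column, then return '.'.
--     """
--     n = len(board)
--     count_x, count_o = 0, 0
--     for i in range(n):
--         for j in range(n):
--             count_x += int(board[j][i] == 'X')
--             count_o += int(board[j][i] == 'O')
--         if count_x == n:
--             return 'X'
--         elif count_o == n:
--             return 'O'
--         count_x, count_o = 0, 0
--     return '.'
-- ===== SOURCE B (Python) =====
-- def check_all_columns(board):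
--     """
--     Return 'X' if any column consists entirely of 'X', 'O' accordingly.
--     If there is no such column, then return '.'.
--     """
--     n = len(board)
--     if not board:
--         return '.'
--     cand = [board[0][i] for i in range(n)]
--     alive = list(range(n))
--     for row in board[1:]:
--         alive = [i for i in alive if row[i] == cand[i]]
--     for i in alive:
--         if cand[i] in ('X', 'O'):
--             return cand[i]
--     return '.'
-- ===== Notes on version B (the rewrite author's own statement) =====
-- stated objective: alternative
-- what changed: Replaces A's column-major double loop with two counters by a row-major candidate-elimination pass: take the first row as per-column candidates, sweep the remaining rows once eliminating columns whose cell differs from the candidate, then report the first surviving column whose candidate is 'X' or 'O'.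
-- outside the precondition, e.g. on check_all_columns([['X', 'X'], ['X']]): A returns 'X', B raises IndexError
import Mathlib
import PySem

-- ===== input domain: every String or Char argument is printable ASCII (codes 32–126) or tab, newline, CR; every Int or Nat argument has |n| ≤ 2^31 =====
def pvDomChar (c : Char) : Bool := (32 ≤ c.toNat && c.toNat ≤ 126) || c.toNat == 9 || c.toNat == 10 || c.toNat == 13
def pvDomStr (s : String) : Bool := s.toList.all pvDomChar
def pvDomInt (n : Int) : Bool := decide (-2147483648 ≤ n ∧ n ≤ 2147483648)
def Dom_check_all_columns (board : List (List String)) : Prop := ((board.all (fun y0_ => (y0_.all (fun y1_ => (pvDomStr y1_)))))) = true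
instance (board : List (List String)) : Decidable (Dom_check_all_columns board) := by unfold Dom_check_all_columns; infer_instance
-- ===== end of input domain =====

-- B replaces A's column-major counter loops by a row-major candidate-elimination sweep (same O(n^2) class; a timing run measured B faster by a constant factor).

-- ===== PORT A =====
-- board[j][i] (both indices are nonnegative and in range on every input Pre_ admits;
-- the .getD defaults are never reached there)
def pvCell (board : List (List String)) (j i : Int) : String :=
  (PySem.List.pyGet? ((PySem.List.pyGet? board j).getD []) i).getD ""

-- the inner 'for j in range(n)' loop accumulating count_x, count_o
def caInner (board : List (List String)) (i : Int) (js : List Int) (cx co : Int) : Int × Int :=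
  match js with
  | [] => (cx, co)
  | j :: rest =>
      caInner board i rest
        (cx + (if pvCell board j i = "X" then 1 else 0))
        (co + (if pvCell board j i = "O" then 1 else 0))

-- the outer 'for i in range(n)' loop with its early returns
def caOuter (board : List (List String)) (n : Int) (is_ : List Int) : String :=
  match is_ with
  | [] => "."
  | i :: rest =>
      let p := caInner board i (PySem.List.pyRange 0 n 1) 0 0
      if p.1 = n then "X"
      else if p.2 = n then "O"
      else caOuter board n rest

def check_all_columns (board : List (List String)) : String :=
  caOuter board (board.length : Int) (PySem.List.pyRange 0 (board.length : Int) 1)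

-- ===== PORT B =====
-- row[i] / cand[i]  (nonnegative, in-range index on every input Pre_ admits)
def cbGet (xs : List String) (i : Int) : String :=
  (PySem.List.pyGet? xs i).getD ""

-- 'for row in board[1:]: alive = [i for i in alive if row[i] == cand[i]]'
def cbElim (cand : List String) (rows : List (List String)) (alive : List Int) : List Int :=
  match rows with
  | [] => alive
  | r :: rest => cbElim cand rest (alive.filter (fun i => cbGet r i == cbGet cand i))

-- 'for i in alive: if cand[i] in ("X","O"): return cand[i]'
def cbScan (cand : List String) (alive : List Int) : String :=
  match alive with
  | [] => "."
  | i :: rest =>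
      if cbGet cand i = "X" ∨ cbGet cand i = "O" then cbGet cand i else cbScan cand rest

def check_all_columns_alt (board : List (List String)) : String :=
  if board = [] then "."
  else
    let n : Int := (board.length : Int)
    let row0 := (PySem.List.pyGet? board 0).getD []
    let cand := (PySem.List.pyRange 0 n 1).map (fun i => cbGet row0 i)
    let alive := cbElim cand (PySem.List.slice board (some 1) none) (PySem.List.pyRange 0 n 1)
    cbScan cand alive

-- ===== PRECONDITION & SPEC =====
-- Pre_ excludes ragged boards (some row shorter than the number of rows): on those Python's
-- board[j][i] / row[i] raises IndexError in one or both programs (A may instead return early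
-- when a full column precedes the short row, a value B's single row sweep cannot reach).
def Pre_check_all_columns (board : List (List String)) : Prop :=
  ∀ row ∈ board, board.length ≤ row.length
instance (board : List (List String)) : Decidable (Pre_check_all_columns board) := by
  unfold Pre_check_all_columns; infer_instance
def pvWitness_check_all_columns : List (List String) := [["X", "O"], ["O", "X"]]
def Spec_check_all_columns (board : List (List String)) (out : String) : Prop := out = check_all_columns_alt board
instance (board : List (List String)) (out : String) : Decidable (Spec_check_all_columns board out) := by unfold Spec_check_all_columns; infer_instance

-- ===== CLAIM (what is proved, stated in full; the proofs are below) =====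
def Claim_equal_check_all_columns : Prop := ∀ (board : List (List String)), Dom_check_all_columns board → Pre_check_all_columns board → Spec_check_all_columns board (check_all_columns board)

-- ===== LEMMAS AND PROOFS =====

-- A's inner loop computes the two counts over the column
theorem caInner_eq (board : List (List String)) (i : Int) (js : List Int) (cx co : Int) :
    caInner board i js cx co =
      (cx + ((js.map (fun j => pvCell board j i)).countP (fun s => s == "X") : Int),
       co + ((js.map (fun j => pvCell board j i)).countP (fun s => s == "O") : Int)) := by
  induction js generalizing cx co with
  | nil => simp [caInner]
  | cons j rest ih =>
      simp only [caInner, ih, List.map_cons, List.countP_cons, Prod.mk.injEq]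
      constructor
      · by_cases h : pvCell board j i = "X" <;> simp [h]; ring
      · by_cases h : pvCell board j i = "O" <;> simp [h]; ring

-- countP = length characterisation for the two counters, over Int
theorem count_full_iff (col : List String) (n₀ : Nat) (hlen : col.length = n₀) (c : String) :
    ((col.countP (fun s => s == c) : Int) = (n₀ : Int)) ↔ ∀ x ∈ col, x = c := by
  rw [show ((col.countP (fun s => s == c) : Int) = (n₀ : Int)) ↔
        col.countP (fun s => s == c) = n₀ from by exact_mod_cast Iff.rfl]
  rw [← hlen, List.countP_eq_length]
  simp

-- A's column (indexed through board[j]) is the board mapped row-wise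
theorem col_map (board : List (List String)) (i : Int) :
    (PySem.List.pyRange 0 (board.length : Int) 1).map (fun j => pvCell board j i) =
      board.map (fun r => cbGet r i) := by
  rw [PySem.List.pyRange_zero_natCast, List.map_map]
  apply List.ext_getElem (by simp)
  intro k h1 h2
  simp only [List.getElem_map, List.getElem_range, Function.comp_apply, pvCell, cbGet]
  rw [PySem.List.pyGet?_natCast]
  simp_all

-- reading the candidate list at an in-range index gives row0's cell
theorem cand_get (r0 : List String) (n k : Nat) (hk : k < n) :
    cbGet ((PySem.List.pyRange 0 (n : Int) 1).map (fun i => cbGet r0 i)) (k : Int) =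
      cbGet r0 (k : Int) := by
  unfold cbGet
  rw [PySem.List.pyGet?_natCast, PySem.List.getElem?_map_pyRange_zero _ _ _ hk]
  rfl

-- B's elimination loop is one filter by 'every remaining row matches the candidate'
theorem cbElim_filter (cand : List String) (rows : List (List String)) (alive : List Int) :
    cbElim cand rows alive =
      alive.filter (fun i => rows.all (fun r => cbGet r i == cbGet cand i)) := by
  induction rows generalizing alive with
  | nil => simp [cbElim]
  | cons r rest ih =>
      simp only [cbElim, ih, List.filter_filter, List.all_cons]
      apply List.filter_congr
      intro i _
      exact Bool.and_comm _ _

-- the loops agree: A's outer scan equals B's scan of the filtered survivors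
theorem outer_eq (r0 : List String) (rest : List (List String)) (is_ : List Int)
    (hmem : ∀ i ∈ is_, ∃ k : Nat, i = (k : Int) ∧ k < (r0 :: rest).length) :
    caOuter (r0 :: rest) ((r0 :: rest).length : Int) is_ =
      cbScan ((PySem.List.pyRange 0 ((r0 :: rest).length : Int) 1).map (fun i => cbGet r0 i))
        (is_.filter (fun i => rest.all (fun r =>
          cbGet r i == cbGet ((PySem.List.pyRange 0 ((r0 :: rest).length : Int) 1).map
            (fun i => cbGet r0 i)) i))) := by
  set b := r0 :: rest with hb
  set cand := (PySem.List.pyRange 0 (b.length : Int) 1).map (fun i => cbGet r0 i) with hcand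
  induction is_ with
  | nil => rfl
  | cons i tl ih =>
      obtain ⟨k, hik, hkn⟩ := hmem i (by simp)
      have htl : ∀ i ∈ tl, ∃ k : Nat, i = (k : Int) ∧ k < b.length := by
        intro j hj; exact hmem j (by simp [hj])
      have hcv : cbGet cand i = cbGet r0 i := by
        rw [hik]; exact cand_get r0 b.length k hkn
      have hcol := col_map b i
      have hlen : (b.map (fun r => cbGet r i)).length = b.length := by simp
      -- the per-column characterisations
      have hfullX : ((((b.map (fun r => cbGet r i)).countP (fun s => s == "X")) : Int) = (b.length : Int)) ↔
          (cbGet r0 i = "X" ∧ ∀ r ∈ rest, cbGet r i = "X") := by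
        rw [count_full_iff _ _ hlen]; simp [hb]
      have hfullO : ((((b.map (fun r => cbGet r i)).countP (fun s => s == "O")) : Int) = (b.length : Int)) ↔
          (cbGet r0 i = "O" ∧ ∀ r ∈ rest, cbGet r i = "O") := by
        rw [count_full_iff _ _ hlen]; simp [hb]
      have halive : (rest.all (fun r => cbGet r i == cbGet cand i) = true) ↔
          ∀ r ∈ rest, cbGet r i = cbGet r0 i := by
        simp [hcv]
      simp only [caOuter, caInner_eq, hcol, zero_add, List.filter_cons]
      by_cases hx : cbGet r0 i = "X" ∧ ∀ r ∈ rest, cbGet r i = "X"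
      · rw [if_pos (hfullX.mpr hx)]
        have ha : rest.all (fun r => cbGet r i == cbGet cand i) = true :=
          halive.mpr (fun r hr => (hx.2 r hr).trans hx.1.symm)
        rw [if_pos ha]
        simp only [cbScan]
        rw [if_pos (Or.inl (hcv.trans hx.1)), hcv, hx.1]
      · rw [if_neg (fun h => hx (hfullX.mp h))]
        by_cases ho : cbGet r0 i = "O" ∧ ∀ r ∈ rest, cbGet r i = "O"
        · rw [if_pos (hfullO.mpr ho)]
          have ha : rest.all (fun r => cbGet r i == cbGet cand i) = true :=
            halive.mpr (fun r hr => (ho.2 r hr).trans ho.1.symm)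
          rw [if_pos ha]
          simp only [cbScan]
          rw [if_pos (Or.inr (hcv.trans ho.1)), hcv, ho.1]
        · rw [if_neg (fun h => ho (hfullO.mp h))]
          by_cases ha : rest.all (fun r => cbGet r i == cbGet cand i) = true
          · rw [if_pos ha]
            simp only [cbScan]
            have hnot : ¬ (cbGet cand i = "X" ∨ cbGet cand i = "O") := by
              rintro (h | h)
              · exact hx ⟨hcv.symm.trans h, fun r hr => ((halive.mp ha) r hr).trans (hcv.symm.trans h)⟩
              · exact ho ⟨hcv.symm.trans h, fun r hr => ((halive.mp ha) r hr).trans (hcv.symm.trans h)⟩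
            rw [if_neg hnot]
            exact ih htl
          · rw [if_neg ha]
            exact ih htl

-- ===== VERDICT (by name: the statement is the Claim_ definition above) =====
theorem check_all_columns_spec : Claim_equal_check_all_columns := by
  intro board _ _
  unfold Spec_check_all_columns check_all_columns check_all_columns_alt
  cases board with
  | nil => rfl
  | cons r0 rest =>
      rw [if_neg (by simp)]
      simp only [PySem.List.slice_from_one, List.tail_cons, cbElim_filter]
      have hrow0 : (PySem.List.pyGet? (r0 :: rest) 0).getD [] = r0 := by
        simp [pysem]
      rw [hrow0]
      exact outer_eq r0 rest _ (by
        intro i hi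
        rw [PySem.List.mem_pyRange_one] at hi
        obtain ⟨h0, h1⟩ := hi
        refine ⟨i.toNat, by omega, ?_⟩
        simp only [List.length_cons] at h1 ⊢
        omega)
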